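-- pv_equiv track=rewrite | github.com/sfendell/malazan-cube | mse_parse.py | serialize_card_block
-- ===== SOURCE A (Python) =====
-- CARD_KEYS_ORDER = [
--     "has_styling", "notes", "time_created", "time_modified", "name", "casting_cost", "image",
--     "image_2", "mainframe_image", "mainframe_image_2", "super_type", "super_type_2", "super_type_3", "super_type_4",
--     "sub_type", "sub_type_2", "sub_type_3", "sub_type_4", "rule_text", "flavor_text", "power", "toughness",
--     "illustrator", "card_code_text", "card_code_text_2", "card_code_text_3",
-- ]
--
-- def serialize_card_block(card: dict) -> str:
--     """Serialize one card dict to set file block (no leading 'card:\\n')."""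
--     keys_order = [k for k in CARD_KEYS_ORDER if k in card]
--     keys_order += sorted(k for k in card if k not in CARD_KEYS_ORDER)
--     lines = []
--     for key in keys_order:
--         val = card.get(key, "")
--         if key == "rule_text" and val:
--             lines.append("\trule_text:")
--             for ln in val.split("\n"):
--                 lines.append(f"\t\t{ln}")
--         else:
--             lines.append(f"\t{key}: {val}")
--     return "\n".join(lines)
-- ===== SOURCE B (Python) =====
-- CARD_KEYS_ORDER = [
--     "has_styling", "notes", "time_created", "time_modified", "name", "casting_cost", "image",
--     "image_2", "mainframe_image", "mainframe_image_2", "super_type", "super_type_2", "super_type_3", "super_type_4",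
--     "sub_type", "sub_type_2", "sub_type_3", "sub_type_4", "rule_text", "flavor_text", "power", "toughness",
--     "illustrator", "card_code_text", "card_code_text_2", "card_code_text_3",
-- ]
--
-- _ORDER = {k: i for i, k in enumerate(CARD_KEYS_ORDER)}
-- _BIG = len(CARD_KEYS_ORDER)
--
--
-- def _emit(key, val):
--     """Lines for one key."""
--     if key == "rule_text" and val:
--         return ["\trule_text:"] + ["\t\t%s" % ln for ln in val.split("\n")]
--     return ["\t%s: %s" % (key, val)]
--
--
-- def serialize_card_block(card: dict) -> str:
--     """Serialize one card dict to set file block (no leading 'card:\\n')."""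
--     keys = sorted(card, key=lambda k: (_ORDER.get(k, _BIG), k))
--     return "\n".join(ln for key in keys for ln in _emit(key, card[key]))
-- ===== Notes on version B (the rewrite author's own statement) =====
-- stated objective: alternative
-- what changed: A builds the key order in two differently-shaped passes (filter CARD_KEYS_ORDER by membership, then append the sorted leftovers) and accumulates lines with an appending loop; B builds an index table {key: position} once and obtains the same order with a single sort by the composite key (index-or-len, key), emitting the lines per key with a helper joined by a flat comprehension.
import Mathlib
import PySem

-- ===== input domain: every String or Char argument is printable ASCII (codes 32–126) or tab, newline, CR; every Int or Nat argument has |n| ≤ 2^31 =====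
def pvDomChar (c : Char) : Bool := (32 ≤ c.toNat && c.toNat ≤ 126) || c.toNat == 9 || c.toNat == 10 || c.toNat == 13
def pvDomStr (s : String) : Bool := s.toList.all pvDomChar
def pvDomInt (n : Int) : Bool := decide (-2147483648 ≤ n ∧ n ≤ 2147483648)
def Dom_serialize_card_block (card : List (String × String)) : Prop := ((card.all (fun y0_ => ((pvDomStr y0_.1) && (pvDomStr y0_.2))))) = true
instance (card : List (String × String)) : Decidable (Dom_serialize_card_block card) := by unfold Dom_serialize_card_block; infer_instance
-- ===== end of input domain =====

-- B replaces A's two ordering passes (filter the constant key list, then append sorted leftovers)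
-- by one sort under a composite (index-table, name) key, and emits lines per key via flatMap;
-- same return value, similar cost ("alternative", no speed claim).


-- ===== PORT A =====
def CARD_KEYS_ORDER : List String := [
    "has_styling", "notes", "time_created", "time_modified", "name", "casting_cost", "image",
    "image_2", "mainframe_image", "mainframe_image_2", "super_type", "super_type_2", "super_type_3", "super_type_4",
    "sub_type", "sub_type_2", "sub_type_3", "sub_type_4", "rule_text", "flavor_text", "power", "toughness",
    "illustrator", "card_code_text", "card_code_text_2", "card_code_text_3"]

-- card : dict → association list; the dict the Python receives is dict(card) = PySem.Dict.ofList card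
def serialize_card_block (card : List (String × String)) : String :=
  let d := PySem.Dict.ofList card
  let keys_order := CARD_KEYS_ORDER.filter (fun k => d.contains k)
  let keys_order := keys_order ++
    PySem.List.sorted (d.keys.filter (fun k => !CARD_KEYS_ORDER.contains k)) (fun k => k) false
  let lines := keys_order.foldl (fun lines key =>
      let val := d.getD key ""
      if key == "rule_text" && val != "" then
        -- val.split("\n"): the separator is the literal "\n" ≠ "", so split? never returns none; .getD [] is exact
        ((PySem.Str.split? val "\n").getD []).foldl
          (fun lines ln => lines ++ ["\t\t" ++ ln]) (lines ++ ["\trule_text:"])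
      else
        lines ++ ["\t" ++ key ++ ": " ++ val]) []
  PySem.Str.join "\n" lines

-- ===== PORT B =====
-- _ORDER = {k: i for i, k in enumerate(CARD_KEYS_ORDER)}
def pvORDER : PySem.Dict String Int :=
  PySem.Dict.ofList ((PySem.List.enumerate CARD_KEYS_ORDER).map (fun p => (p.2, p.1)))

-- _BIG = len(CARD_KEYS_ORDER)
def pvBIG : Int := PySem.List.len CARD_KEYS_ORDER

-- lines for one key
def pvEmit (key val : String) : List String :=
  if key == "rule_text" && val != "" then
    ["\trule_text:"] ++ ((PySem.Str.split? val "\n").getD []).map (fun ln => "\t\t" ++ ln)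
  else
    ["\t" ++ key ++ ": " ++ val]

def serialize_card_block_alt (card : List (String × String)) : String :=
  let d := PySem.Dict.ofList card
  -- sorted(card, key=lambda k: (_ORDER.get(k, _BIG), k)); the tuple key is sorted2's pair of keys
  let keys := PySem.List.sorted2 d.keys (fun k => pvORDER.getD k pvBIG) (fun k => k) false
  -- card[key]: key comes from card's own keys, so KeyError is impossible; getD "" is exact here
  PySem.Str.join "\n" (keys.flatMap (fun key => pvEmit key (d.getD key "")))

-- ===== PRECONDITION & SPEC =====
def Spec_serialize_card_block (card : List (String × String)) (out : String) : Prop := out = serialize_card_block_alt card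
instance (card : List (String × String)) (out : String) : Decidable (Spec_serialize_card_block card out) := by unfold Spec_serialize_card_block; infer_instance

-- ===== CLAIM (what is proved, stated in full; the proofs are below) =====
def Claim_equal_serialize_card_block : Prop := ∀ (card : List (String × String)), Dom_serialize_card_block card → Spec_serialize_card_block card (serialize_card_block card)

-- ===== LEMMAS AND PROOFS =====

-- Python's tuple key (k1, k2) is the lexicographic order: sorted2 is sorted under the Lex key
theorem pv_sorted2_eq_sorted_lex {α : Type} (xs : List α) (k1 : α → Int) (k2 : α → String) :
    PySem.List.sorted2 xs k1 k2 false
      = PySem.List.sorted xs (fun x => (toLex (k1 x, k2 x) : Lex (Int × String))) false := by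
  rw [PySem.List.sorted_eq_foldl_insertBy]
  show List.foldl (fun acc x => PySem.List.insertBy
      (fun a b => decide (k1 a < k1 b) || (!decide (k1 b < k1 a) && decide (k2 a < k2 b))) x acc) [] xs = _
  have h : (fun (a b : α) => decide (k1 a < k1 b) || (!decide (k1 b < k1 a) && decide (k2 a < k2 b)))
      = (fun a b => decide ((toLex (k1 a, k2 a) : Lex (Int × String)) < toLex (k1 b, k2 b))) := by
    funext a b
    rcases lt_trichotomy (k1 a) (k1 b) with hc | hc | hc
    · simp [Prod.Lex.lt_iff, hc]
    · simp [Prod.Lex.lt_iff, hc]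
    · simp [Prod.Lex.lt_iff, hc, lt_asymm hc, hc.ne']
  rw [h]

theorem pvORDER_keys : pvORDER.keys = CARD_KEYS_ORDER := by decide

theorem pvORDER_lt_of_mem : ∀ k ∈ CARD_KEYS_ORDER, pvORDER.getD k pvBIG < pvBIG := by decide

theorem pvORDER_of_not_mem (k : String) (h : k ∉ CARD_KEYS_ORDER) :
    pvORDER.getD k pvBIG = pvBIG := by
  apply PySem.Dict.getD_of_not_contains
  rw [Bool.eq_false_iff]
  intro hc
  exact h (pvORDER_keys ▸ (PySem.Dict.contains_iff_mem_keys pvORDER k).1 hc)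

theorem pvORDER_pairwise :
    List.Pairwise (fun a b => pvORDER.getD a pvBIG < pvORDER.getD b pvBIG) CARD_KEYS_ORDER := by
  decide

theorem pvCKO_nodup : CARD_KEYS_ORDER.Nodup := by decide

-- A's key order IS sorted(keys) under the Lex composite key
theorem pv_keys_eq (d : PySem.Dict String String) (hnd : d.keys.Nodup) :
    PySem.List.sorted d.keys (fun k => (toLex (pvORDER.getD k pvBIG, k) : Lex (Int × String))) false
      = CARD_KEYS_ORDER.filter (fun k => d.contains k) ++
        PySem.List.sorted (d.keys.filter (fun k => !CARD_KEYS_ORDER.contains k)) (fun k => k) false := by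
  apply PySem.List.sorted_eq_of_perm_of_pairwise_lt
  · -- permutation with d.keys
    have h1 : (PySem.List.sorted (d.keys.filter (fun k => !CARD_KEYS_ORDER.contains k)) (fun k => k) false).Perm
        (d.keys.filter (fun k => !CARD_KEYS_ORDER.contains k)) :=
      PySem.List.sorted_perm _ _ _
    have h2 : (CARD_KEYS_ORDER.filter (fun k => d.contains k)).Perm
        (d.keys.filter (fun k => CARD_KEYS_ORDER.contains k)) := by
      rw [List.perm_ext_iff_of_nodup (pvCKO_nodup.filter _) (hnd.filter _)]
      intro a
      simp only [List.mem_filter, PySem.Dict.contains_iff_mem_keys, List.contains_iff_mem, and_comm]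
    exact ((h2.append h1).trans (List.filter_append_perm _ d.keys))
  · -- pairwise strictly increasing composite key
    rw [List.pairwise_append]
    refine ⟨?_, ?_, ?_⟩
    · refine ((pvORDER_pairwise.filter _).imp ?_)
      intro a b hab
      exact Prod.Lex.lt_iff.2 (Or.inl hab)
    · have hle := PySem.List.sorted_pairwise (d.keys.filter (fun k => !CARD_KEYS_ORDER.contains k)) (fun k => k)
      have hne : (PySem.List.sorted (d.keys.filter (fun k => !CARD_KEYS_ORDER.contains k)) (fun k => k) false).Nodup :=
        ((PySem.List.sorted_perm _ _ _).nodup_iff).2 (hnd.filter _)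
      refine (hle.and hne).imp_of_mem ?_
      intro a b ha hb hab
      have ha' : a ∉ CARD_KEYS_ORDER := by
        have := (PySem.List.mem_sorted _ _ _ _).1 ha
        simpa [List.mem_filter, List.contains_iff_mem] using (List.mem_filter.1 this).2
      have hb' : b ∉ CARD_KEYS_ORDER := by
        have := (PySem.List.mem_sorted _ _ _ _).1 hb
        simpa [List.mem_filter, List.contains_iff_mem] using (List.mem_filter.1 this).2
      refine Prod.Lex.lt_iff.2 (Or.inr ⟨?_, lt_of_le_of_ne hab.1 hab.2⟩)
      simp [pvORDER_of_not_mem a ha', pvORDER_of_not_mem b hb']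
    · intro a ha b hb
      have ha' : a ∈ CARD_KEYS_ORDER := (List.mem_filter.1 ha).1
      have hb' : b ∉ CARD_KEYS_ORDER := by
        have := (PySem.List.mem_sorted _ _ _ _).1 hb
        simpa [List.mem_filter, List.contains_iff_mem] using (List.mem_filter.1 this).2
      refine Prod.Lex.lt_iff.2 (Or.inl ?_)
      rw [pvORDER_of_not_mem b hb']
      exact pvORDER_lt_of_mem a ha'

-- A's appending loop body emits exactly pvEmit's lines
theorem pv_step_eq (d : PySem.Dict String String) :
    (fun (lines : List String) (key : String) =>
      let val := d.getD key ""
      if key == "rule_text" && val != "" then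
        ((PySem.Str.split? val "\n").getD []).foldl
          (fun lines ln => lines ++ ["\t\t" ++ ln]) (lines ++ ["\trule_text:"])
      else
        lines ++ ["\t" ++ key ++ ": " ++ val])
    = (fun lines key => lines ++ pvEmit key (d.getD key "")) := by
  funext lines key
  simp only [pvEmit]
  split
  · rw [PySem.List.foldl_append_singleton_eq_map]
    simp
  · rfl

-- ===== VERDICT (by name: the statement is the Claim_ definition above) =====
theorem serialize_card_block_spec : Claim_equal_serialize_card_block := by
  intro card _
  unfold Spec_serialize_card_block serialize_card_block serialize_card_block_alt
  simp only
  rw [pv_sorted2_eq_sorted_lex, pv_keys_eq _ (PySem.Dict.nodup_keys_ofList card),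
    pv_step_eq, PySem.List.foldl_append_eq_flatMap]
  simp
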